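-- pv_equiv track=rewrite | github.com/james4388/algorithm-1 | algorithms/google/PredictWinner.py | winner3
-- ===== SOURCE A (Python) =====
-- def winner3(nums):
--     if not nums:
--         return True
--
--     n = len(nums)
--     dp = [0 for _ in range(n)]
--
--     for i in range(n-1, -1, -1):
--         for j in range(i+1, n):
--             dp[j] = max(nums[i] - dp[j], nums[j] - dp[j-1])
--     return dp[n-1] >= 0
-- ===== SOURCE B (Python) =====
-- def winner3(nums):
--     if not nums:
--         return True
--     g = [0] * len(nums)  # g[i] = best score margin on interval of length L starting at i; L = 0 base is 0
--     for L in range(1, len(nums)):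
--         g = [max(nums[i] - g[i + 1], nums[i + L] - g[i])
--              for i in range(len(nums) - L)]
--     return g[0] >= 0
-- ===== Notes on version B (the rewrite author's own statement) =====
-- stated objective: alternative
-- what changed: Replaces A's row-major in-place 1-D dp (outer index i descending, inner j ascending, writes into one zero-initialized array) with a length-major (diagonal) dp that builds a fresh shrinking list per interval length via a comprehension and tests whether the final margin is nonnegative.
import Mathlib
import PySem

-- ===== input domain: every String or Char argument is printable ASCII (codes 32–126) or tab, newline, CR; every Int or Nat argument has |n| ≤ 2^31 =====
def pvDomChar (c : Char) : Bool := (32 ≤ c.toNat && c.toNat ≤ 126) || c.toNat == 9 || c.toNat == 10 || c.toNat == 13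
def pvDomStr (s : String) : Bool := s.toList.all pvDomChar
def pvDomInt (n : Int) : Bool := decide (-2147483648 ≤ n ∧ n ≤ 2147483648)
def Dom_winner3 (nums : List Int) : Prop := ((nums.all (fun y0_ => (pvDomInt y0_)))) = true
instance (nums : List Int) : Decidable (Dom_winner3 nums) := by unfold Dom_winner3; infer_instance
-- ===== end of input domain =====

-- B replaces A's row-major in-place 1-D dp with a length-major (diagonal) dp building a fresh
-- shrinking list per interval length (same O(n^2) cost, different traversal and data handling).

-- ===== PORT A =====
-- the inner 'for j in range(i+1, n)' loop of A
def winner3Inner (nums : List Int) (i : Int) (dp0 : List Int) (n : Int) : List Int :=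
  (PySem.List.pyRange (i + 1) n 1).foldl
    (fun dp j =>
      PySem.List.pySetD dp j
        (max (PySem.List.pyGetD nums i 0 - PySem.List.pyGetD dp j 0)
             (PySem.List.pyGetD nums j 0 - PySem.List.pyGetD dp (j - 1) 0)))
    dp0

def winner3 (nums : List Int) : Bool :=
  if nums = [] then true
  else
    let n : Int := nums.length
    let dp0 : List Int := (PySem.List.pyRange 0 n 1).map (fun _ => 0)
    let dp := (PySem.List.pyRange (n - 1) (-1) (-1)).foldl
      (fun dp i => winner3Inner nums i dp n) dp0
    decide (PySem.List.pyGetD dp (n - 1) 0 ≥ 0)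

-- ===== PORT B =====
def winner3_alt (nums : List Int) : Bool :=
  if nums = [] then true
  else
    let n : Int := nums.length
    let g0 : List Int := List.replicate nums.length 0       -- [0] * len(nums)
    let g := (PySem.List.pyRange 1 n 1).foldl
      (fun g L =>
        (PySem.List.pyRange 0 (n - L) 1).map
          (fun i => max (PySem.List.pyGetD nums i 0 - PySem.List.pyGetD g (i + 1) 0)
                        (PySem.List.pyGetD nums (i + L) 0 - PySem.List.pyGetD g i 0)))
      g0
    decide (PySem.List.pyGetD g 0 0 ≥ 0)

-- ===== PRECONDITION & SPEC =====
def Spec_winner3 (nums : List Int) (out : Bool) : Prop := out = winner3_alt nums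
instance (nums : List Int) (out : Bool) : Decidable (Spec_winner3 nums out) := by unfold Spec_winner3; infer_instance

-- ===== CLAIM (what is proved, stated in full; the proofs are below) =====
def Claim_equal_winner3 : Prop := ∀ (nums : List Int), Dom_winner3 nums → Spec_winner3 nums (winner3 nums)

-- ===== LEMMAS AND PROOFS =====

-- the common specification: optimal score margin of the first player on nums[i..j], zero-based case 0
def pvF (nums : List Int) (i j : Nat) : Int :=
  if _h : i ≥ j then 0
  else
    max (PySem.List.pyGetD nums (i : Int) 0 - pvF nums (i + 1) j)
        (PySem.List.pyGetD nums (j : Int) 0 - pvF nums i (j - 1))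
termination_by j - i
decreasing_by all_goals omega

lemma pvF_base (nums : List Int) {i j : Nat} (h : j ≤ i) : pvF nums i j = 0 := by
  rw [pvF]; simp [h]

lemma pvF_step (nums : List Int) {i j : Nat} (h : i < j) :
    pvF nums i j =
      max (PySem.List.pyGetD nums (i : Int) 0 - pvF nums (i + 1) j)
          (PySem.List.pyGetD nums (j : Int) 0 - pvF nums i (j - 1)) := by
  rw [pvF]; simp [Nat.not_le.mpr h]

-- ===== A-side: row-major dp invariant =====

-- state of A's dp array: rows nums.length-1 .. i+1 done, row i done up to column a (exclusive)
def pvSt (nums : List Int) (i a : Nat) (dp : List Int) : Prop :=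
  dp.length = nums.length ∧ ∀ k, k < nums.length →
    dp.getD k 0 =
      if k ≤ i then 0
      else if k < a then pvF nums i k
      else pvF nums (i + 1) k

lemma inner_go (nums : List Int) (i : Nat) :
    ∀ (m a : Nat) (dp : List Int), nums.length = a + m → i < a → pvSt nums i a dp →
    pvSt nums i nums.length
      ((PySem.List.pyRange (a : Int) (nums.length : Int) 1).foldl
        (fun dp j =>
          PySem.List.pySetD dp j
            (max (PySem.List.pyGetD nums (i : Int) 0 - PySem.List.pyGetD dp j 0)
                 (PySem.List.pyGetD nums (j : Int) 0 - PySem.List.pyGetD dp (j - 1) 0))) dp) := by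
  intro m
  induction m with
  | zero =>
    intro a dp hlen _ hst
    rw [PySem.List.pyRange_one_eq_nil (by omega)]
    simpa [hlen] using hst
  | succ m ih =>
    intro a dp hlen hia hst
    obtain ⟨hdl, hdp⟩ := hst
    have ha : (a : Int) < (nums.length : Int) := by omega
    rw [PySem.List.pyRange_one_cons ha]
    rw [List.foldl_cons]
    have ha1 : ((a : Int) + 1) = (((a + 1 : Nat)) : Int) := by push_cast; ring
    rw [ha1]
    apply ih (a + 1) _ (by omega) (by omega)
    constructor
    · simpa using hdl
    · intro k hk
      have hset : PySem.List.pySetD dp (a : Int)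
          (max (PySem.List.pyGetD nums (i : Int) 0 - PySem.List.pyGetD dp (a : Int) 0)
               (PySem.List.pyGetD nums (a : Int) 0 - PySem.List.pyGetD dp ((a : Int) - 1) 0))
          = dp.set a
          (max (PySem.List.pyGetD nums (i : Int) 0 - PySem.List.pyGetD dp (a : Int) 0)
               (PySem.List.pyGetD nums (a : Int) 0 - PySem.List.pyGetD dp ((a : Int) - 1) 0)) := by
        simp
      rw [hset]
      have ha1' : ((a : Int) - 1) = (((a - 1 : Nat)) : Int) := by omega
      have hdpa : PySem.List.pyGetD dp (a : Int) 0 = pvF nums (i + 1) a := by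
        rw [PySem.List.pyGetD_natCast]
        rw [hdp a (by omega)]
        simp [Nat.not_le.mpr hia]
      have hdpa1 : PySem.List.pyGetD dp ((a : Int) - 1) 0 = pvF nums i (a - 1) := by
        rw [ha1', PySem.List.pyGetD_natCast]
        rw [hdp (a - 1) (by omega)]
        by_cases hai : a - 1 ≤ i
        · have : a - 1 = i := by omega
          rw [if_pos hai, this, pvF_base nums (le_refl i)]
        · rw [if_neg hai, if_pos (by omega)]
      have hval : max (PySem.List.pyGetD nums (i : Int) 0 - PySem.List.pyGetD dp (a : Int) 0)
               (PySem.List.pyGetD nums (a : Int) 0 - PySem.List.pyGetD dp ((a : Int) - 1) 0)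
          = pvF nums i a := by
        rw [hdpa, hdpa1, pvF_step nums hia]
      rw [hval]
      by_cases hka : k = a
      · subst hka
        rw [List.getD_eq_getElem?_getD]
        rw [List.getElem?_set_self (by omega)]
        simp [Nat.not_le.mpr hia]
      · rw [List.getD_eq_getElem?_getD, List.getElem?_set_ne (by omega), ← List.getD_eq_getElem?_getD]
        rw [hdp k hk]
        by_cases h1 : k ≤ i
        · simp [h1]
        · by_cases h2 : k < a
          · rw [if_neg h1, if_pos h2, if_neg h1, if_pos (by omega)]
          · rw [if_neg h1, if_neg h2, if_neg h1, if_neg (by omega)]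

-- state of A's dp array between outer iterations: rows nums.length-1 .. i done
def pvQ (nums : List Int) (i : Nat) (dp : List Int) : Prop :=
  dp.length = nums.length ∧ ∀ k, k < nums.length →
    dp.getD k 0 = if k < i then 0 else pvF nums i k

lemma outer_go (nums : List Int) :
    ∀ (i : Nat), i ≤ nums.length → ∀ dp, pvQ nums i dp →
    pvQ nums 0
      ((PySem.List.pyRange ((i : Int) - 1) (-1) (-1)).foldl
        (fun dp i => winner3Inner nums i dp (nums.length : Int)) dp) := by
  intro i
  induction i with
  | zero =>
    intro _ dp hq
    rw [show ((0 : Nat) : Int) - 1 = -1 by norm_num, PySem.List.pyRange_neg_one_eq_nil (by omega)]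
    exact hq
  | succ m ih =>
    intro hle dp hq
    obtain ⟨hdl, hdp⟩ := hq
    have hm : (((m + 1 : Nat) : Int) - 1) = (m : Int) := by push_cast; ring
    rw [hm, PySem.List.pyRange_neg_one_cons (by omega), List.foldl_cons]
    have hmm : ((m : Int) - 1) = ((m : Nat) : Int) - 1 := rfl
    rw [hmm]
    apply ih (by omega)
    have hst : pvSt nums m (m + 1) dp := by
      refine ⟨hdl, ?_⟩
      intro k hk
      rw [hdp k hk]
      by_cases h1 : k ≤ m
      · simp [h1, Nat.lt_succ_of_le h1]
      · rw [if_neg (by omega), if_neg h1, if_neg (by omega)]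
    have hres := inner_go nums m (nums.length - (m + 1)) (m + 1) dp (by omega) (by omega) hst
    unfold winner3Inner
    rw [show ((m : Int) + 1) = (((m + 1 : Nat)) : Int) by push_cast; ring]
    obtain ⟨hl2, hd2⟩ := hres
    refine ⟨hl2, ?_⟩
    intro k hk
    rw [hd2 k hk]
    by_cases h1 : k ≤ m
    · by_cases h2 : k < m
      · simp [h1, h2]
      · have hkm : k = m := by omega
        rw [if_pos h1, if_neg (by omega), pvF_base nums (le_of_eq hkm)]
    · rw [if_neg h1, if_pos hk, if_neg (by omega)]

lemma dp0_q (nums : List Int) :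
    pvQ nums nums.length ((PySem.List.pyRange 0 (nums.length : Int) 1).map (fun _ => (0 : Int))) := by
  constructor
  · simp [PySem.List.length_pyRange_one]
  · intro k hk
    rw [if_pos hk]
    rcases Nat.lt_or_ge k ((PySem.List.pyRange 0 (nums.length : Int) 1).map (fun _ => (0 : Int))).length with h | h
    · rw [List.getD_eq_getElem?_getD, List.getElem?_eq_getElem h]
      simp
    · rw [List.getD_eq_getElem?_getD, List.getElem?_eq_none h]
      simp

lemma winner3_eq_pvF (nums : List Int) (h : nums ≠ []) :
    winner3 nums = decide (pvF nums 0 (nums.length - 1) ≥ 0) := by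
  unfold winner3
  simp only [if_neg h]
  have hn : 1 ≤ nums.length := List.length_pos_iff.mpr h
  have hq := outer_go nums nums.length (le_refl _) _ (dp0_q nums)
  obtain ⟨hl, hd⟩ := hq
  have hcast : ((nums.length : Int) - 1) = (((nums.length - 1 : Nat)) : Int) := by omega
  rw [hcast] at hd ⊢
  rw [PySem.List.pyGetD_natCast, hd (nums.length - 1) (by omega)]
  simp

-- ===== B-side: length-major dp invariant =====

-- B's list after processing interval length L: g[i] = pvF i (i+L) for i < n - L
def pvStage (nums : List Int) (L : Nat) : List Int :=
  (List.range (nums.length - L)).map (fun i => pvF nums i (i + L))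

lemma stage_step (nums : List Int) (a : Nat) (h1 : 1 ≤ a) (h2 : a < nums.length) :
    (PySem.List.pyRange 0 ((nums.length : Int) - (a : Int)) 1).map
      (fun i => max (PySem.List.pyGetD nums i 0 - PySem.List.pyGetD (pvStage nums (a - 1)) (i + 1) 0)
                    (PySem.List.pyGetD nums (i + (a : Int)) 0 - PySem.List.pyGetD (pvStage nums (a - 1)) i 0))
      = pvStage nums a := by
  have hc : ((nums.length : Int) - (a : Int)) = (((nums.length - a : Nat)) : Int) := by omega
  rw [hc, PySem.List.pyRange_zero_nat, List.map_map]
  unfold pvStage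
  apply List.map_congr_left
  intro i hi
  have hi' : i < nums.length - a := List.mem_range.mp hi
  simp only [Function.comp]
  have e1 : ((i : Int) + 1) = (((i + 1 : Nat)) : Int) := by push_cast; ring
  have e2 : ((i : Int) + (a : Int)) = (((i + a : Nat)) : Int) := by push_cast; ring
  rw [e1, e2]
  simp only [PySem.List.pyGetD_natCast]
  rw [PySem.List.getD_map_range _ _ _ _ (by omega), PySem.List.getD_map_range _ _ _ _ (by omega)]
  rw [pvF_step nums (show i < i + a by omega)]
  have e3 : i + 1 + (a - 1) = i + a := by omega
  have e4 : i + (a - 1) = i + a - 1 := by omega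
  rw [e3, e4]
  simp only [PySem.List.pyGetD_natCast]

lemma b_go (nums : List Int) :
    ∀ (m a : Nat), a + m = nums.length → 1 ≤ a →
    (PySem.List.pyRange (a : Int) (nums.length : Int) 1).foldl
      (fun g L =>
        (PySem.List.pyRange 0 ((nums.length : Int) - L) 1).map
          (fun i => max (PySem.List.pyGetD nums i 0 - PySem.List.pyGetD g (i + 1) 0)
                        (PySem.List.pyGetD nums (i + L) 0 - PySem.List.pyGetD g i 0)))
      (pvStage nums (a - 1)) = pvStage nums (nums.length - 1) := by
  intro m
  induction m with
  | zero =>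
    intro a ha _
    rw [PySem.List.pyRange_one_eq_nil (by omega), List.foldl_nil]
    have haa : a = nums.length := by omega
    rw [haa]
  | succ m ih =>
    intro a ha ha1
    rw [PySem.List.pyRange_one_cons (by omega), List.foldl_cons]
    rw [stage_step nums a ha1 (by omega)]
    have : (pvStage nums a) = (pvStage nums ((a + 1) - 1)) := by norm_num
    rw [this, show ((a : Int) + 1) = (((a + 1 : Nat)) : Int) by push_cast; ring]
    exact ih (a + 1) (by omega) (by omega)

lemma winner3_alt_eq_pvF (nums : List Int) (h : nums ≠ []) :
    winner3_alt nums = decide (pvF nums 0 (nums.length - 1) ≥ 0) := by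
  unfold winner3_alt
  simp only [if_neg h]
  have hn : 1 ≤ nums.length := List.length_pos_iff.mpr h
  have hrep : List.replicate nums.length (0 : Int) = pvStage nums 0 := by
    unfold pvStage
    rw [List.map_congr_left (fun i _ => pvF_base nums (show i + 0 ≤ i by omega))]
    simp [List.map_const']
  have hb := b_go nums (nums.length - 1) 1 (by omega) (le_refl 1)
  simp only [Nat.cast_one, Nat.sub_self] at hb
  rw [hrep, hb]
  have hg : PySem.List.pyGetD (pvStage nums (nums.length - 1)) 0 0
      = pvF nums 0 (0 + (nums.length - 1)) := by
    unfold pvStage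
    rw [PySem.List.pyGetD_zero, PySem.List.getD_map_range _ _ _ _ (by omega)]
  rw [hg, Nat.zero_add]

-- ===== VERDICT (by name: the statement is the Claim_ definition above) =====
theorem winner3_spec : Claim_equal_winner3 := by
  intro nums _
  unfold Spec_winner3
  by_cases hnil : nums = []
  · simp [hnil, winner3, winner3_alt]
  · rw [winner3_eq_pvF nums hnil, winner3_alt_eq_pvF nums hnil]
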